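-- pv_equiv track=rewrite | github.com/alfredronning/knowit_kalender | 2024/day22/solver.py | finn_naboer
-- ===== SOURCE A (Python) =====
-- def finn_naboer(brikker, brikke):
--     visited = {brikke}
--     queue = [brikke]
--     while queue:
--         current = queue.pop()
--         for d in [(1, 0),(-1, 0),(0, 1),(0, -1)]:
--             nabobrikke = (current[0]+d[0], current[1]+d[1], current[2])
--             if nabobrikke not in brikker:
--                 continue
--             if nabobrikke in visited:
--                 continue
--             visited.add(nabobrikke)
--             queue.append(nabobrikke)
--     return visited
-- ===== SOURCE B (Python) =====
-- def finn_naboer(brikker, brikke):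
--     visited = {brikke}
--
--     def utforsk(celle):
--         nye = []
--         for d in [(1, 0), (-1, 0), (0, 1), (0, -1)]:
--             nabo = (celle[0] + d[0], celle[1] + d[1], celle[2])
--             if nabo in brikker and nabo not in visited:
--                 visited.add(nabo)
--                 nye.append(nabo)
--         for nabo in reversed(nye):
--             utforsk(nabo)
--
--     utforsk(brikke)
--     return visited
-- ===== Notes on version B (the rewrite author's own statement) =====
-- stated objective: alternative
-- what changed: Replaces the explicit while-loop with a worklist stack by a recursive flood fill: a helper marks the still-unvisited valid neighbours of a cell and then recurses into each of them, so the queue data structure disappears.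
import Mathlib
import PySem

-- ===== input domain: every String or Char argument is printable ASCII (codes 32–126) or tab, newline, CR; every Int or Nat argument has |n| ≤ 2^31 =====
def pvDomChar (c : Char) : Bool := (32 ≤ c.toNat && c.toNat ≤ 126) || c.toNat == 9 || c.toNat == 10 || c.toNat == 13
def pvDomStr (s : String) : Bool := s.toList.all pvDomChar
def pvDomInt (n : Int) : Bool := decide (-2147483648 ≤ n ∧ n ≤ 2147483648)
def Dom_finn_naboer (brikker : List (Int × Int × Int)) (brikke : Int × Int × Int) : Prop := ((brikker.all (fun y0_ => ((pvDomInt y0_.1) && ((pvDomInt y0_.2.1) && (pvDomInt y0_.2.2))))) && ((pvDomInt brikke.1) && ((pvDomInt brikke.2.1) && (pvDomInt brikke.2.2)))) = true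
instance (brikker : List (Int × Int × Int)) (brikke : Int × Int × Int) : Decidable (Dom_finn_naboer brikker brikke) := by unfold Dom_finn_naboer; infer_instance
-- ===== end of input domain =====

-- B replaces A's explicit while-loop over a worklist stack by a recursive flood fill
-- (objective: alternative decomposition; same cost). Return value only: neither side
-- mutates its arguments observably; the returned Python set is represented as the
-- list of its elements in discovery order.

-- shared vocabulary of both Pythons: the four offsets and the neighbour expression
def pvOffsets : List (Int × Int) := [(1, 0), (-1, 0), (0, 1), (0, -1)]

def pvNabo (c : Int × Int × Int) (d : Int × Int) : Int × Int × Int :=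
  (c.1 + d.1, c.2.1 + d.2, c.2.2)

-- ===== PORT A =====
-- body of A's `for d in [...]` loop: state = (visited, queue)
def pvStepA (brikker : List (Int × Int × Int)) (current : Int × Int × Int)
    (st : List (Int × Int × Int) × List (Int × Int × Int)) (d : Int × Int) :
    List (Int × Int × Int) × List (Int × Int × Int) :=
  if pvNabo current d ∈ brikker then
    if pvNabo current d ∈ st.1 then st
    else (PySem.Set.add st.1 (pvNabo current d), st.2 ++ [pvNabo current d])
  else st

-- B's inner loop, defined up here because A's termination argument reuses the
-- lemmas about it (state = (visited, nye))
def pvStepB (brikker : List (Int × Int × Int)) (celle : Int × Int × Int)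
    (st : List (Int × Int × Int) × List (Int × Int × Int)) (d : Int × Int) :
    List (Int × Int × Int) × List (Int × Int × Int) :=
  if pvNabo celle d ∈ brikker ∧ pvNabo celle d ∉ st.1 then
    (PySem.Set.add st.1 (pvNabo celle d), st.2 ++ [pvNabo celle d])
  else st

-- termination measure: cells of brikker not yet visited
def pvF (brikker visited : List (Int × Int × Int)) : Nat :=
  (brikker.toFinset \ visited.toFinset).card

theorem pvSet_add_of_not_mem (s : List (Int × Int × Int)) (x : Int × Int × Int)
    (h : x ∉ s) : PySem.Set.add s x = s ++ [x] := by
  simp [PySem.Set.add, PySem.Set.contains, h]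

theorem pvStepB_pos (brikker : List (Int × Int × Int)) (c : Int × Int × Int)
    (v ns : List (Int × Int × Int)) (d : Int × Int)
    (h1 : pvNabo c d ∈ brikker) (h2 : pvNabo c d ∉ v) :
    pvStepB brikker c (v, ns) d = (v ++ [pvNabo c d], ns ++ [pvNabo c d]) := by
  simp only [pvStepB]
  rw [if_pos ⟨h1, h2⟩, pvSet_add_of_not_mem _ _ h2]

theorem pvStepB_neg (brikker : List (Int × Int × Int)) (c : Int × Int × Int)
    (v ns : List (Int × Int × Int)) (d : Int × Int)
    (h : ¬(pvNabo c d ∈ brikker ∧ pvNabo c d ∉ v)) :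
    pvStepB brikker c (v, ns) d = (v, ns) := by
  simp only [pvStepB]
  rw [if_neg h]

theorem pvF_append (brikker v : List (Int × Int × Int)) (n : Int × Int × Int)
    (hb : n ∈ brikker) (hv : n ∉ v) : pvF brikker (v ++ [n]) + 1 = pvF brikker v := by
  unfold pvF
  have hins : (v ++ [n]).toFinset = insert n v.toFinset := by
    ext x; simp
  rw [hins, Finset.sdiff_insert]
  rw [Finset.card_erase_of_mem (by simp [hb, hv])]
  have hpos : 0 < (brikker.toFinset \ v.toFinset).card :=
    Finset.card_pos.mpr ⟨n, by simp [hb, hv]⟩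
  omega

-- invariant of B's scan: the measure drops by exactly the number of new cells
theorem pvScanB_measure (brikker : List (Int × Int × Int)) (c : Int × Int × Int) :
    ∀ (ds : List (Int × Int)) (v ns : List (Int × Int × Int)),
      pvF brikker ((ds.foldl (pvStepB brikker c) (v, ns)).1)
        + ((ds.foldl (pvStepB brikker c) (v, ns)).2).length
      = pvF brikker v + ns.length := by
  intro ds
  induction ds with
  | nil => intro v ns; rfl
  | cons d ds ih =>
    intro v ns
    rw [List.foldl_cons]
    by_cases h : pvNabo c d ∈ brikker ∧ pvNabo c d ∉ v
    · rw [pvStepB_pos brikker c v ns d h.1 h.2, ih]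
      have := pvF_append brikker v (pvNabo c d) h.1 h.2
      simp only [List.length_append, List.length_cons, List.length_nil]
      omega
    · rw [pvStepB_neg brikker c v ns d h]
      exact ih v ns

theorem pvScanB_subset (brikker : List (Int × Int × Int)) (c : Int × Int × Int) :
    ∀ (ds : List (Int × Int)) (v ns : List (Int × Int × Int)),
      v ⊆ (ds.foldl (pvStepB brikker c) (v, ns)).1 := by
  intro ds
  induction ds with
  | nil => intro v ns; exact fun _ h => h
  | cons d ds ih =>
    intro v ns
    rw [List.foldl_cons]
    by_cases h : pvNabo c d ∈ brikker ∧ pvNabo c d ∉ v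
    · rw [pvStepB_pos brikker c v ns d h.1 h.2]
      exact fun x hx => ih (v ++ [pvNabo c d]) _ (by simp [hx])
    · rw [pvStepB_neg brikker c v ns d h]
      exact ih v ns

-- A's scan relates to B's scan: same visited set, and the same newly found cells
-- appended at the tail of the queue
theorem pvScan_rel (brikker : List (Int × Int × Int)) (c : Int × Int × Int) :
    ∀ (ds : List (Int × Int)) (v q ns : List (Int × Int × Int)),
      ds.foldl (pvStepA brikker c) (v, q ++ ns)
      = ((ds.foldl (pvStepB brikker c) (v, ns)).1,
          q ++ (ds.foldl (pvStepB brikker c) (v, ns)).2) := by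
  intro ds
  induction ds with
  | nil => intro v q ns; rfl
  | cons d ds ih =>
    intro v q ns
    rw [List.foldl_cons, List.foldl_cons]
    by_cases h1 : pvNabo c d ∈ brikker
    · by_cases h2 : pvNabo c d ∈ v
      · have hA : pvStepA brikker c (v, q ++ ns) d = (v, q ++ ns) := by
          simp only [pvStepA]; rw [if_pos h1, if_pos h2]
        rw [hA, pvStepB_neg brikker c v ns d (by simp [h2])]
        exact ih v q ns
      · have hA : pvStepA brikker c (v, q ++ ns) d
            = (v ++ [pvNabo c d], q ++ (ns ++ [pvNabo c d])) := by
          simp only [pvStepA]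
          rw [if_pos h1, if_neg h2, pvSet_add_of_not_mem _ _ h2, List.append_assoc]
        rw [hA, pvStepB_pos brikker c v ns d h1 h2]
        exact ih _ q _
    · have hA : pvStepA brikker c (v, q ++ ns) d = (v, q ++ ns) := by
        simp only [pvStepA]; rw [if_neg h1]
      rw [hA, pvStepB_neg brikker c v ns d (by simp [h1])]
      exact ih v q ns

-- the while-loop of A (queue.pop() = take the last element)
def pvLoopA (brikker : List (Int × Int × Int)) (visited queue : List (Int × Int × Int)) :
    List (Int × Int × Int) :=
  if h : queue = [] then visited
  else
    pvLoopA brikker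
      ((pvOffsets.foldl (pvStepA brikker (queue.getLast h)) (visited, queue.dropLast)).1)
      ((pvOffsets.foldl (pvStepA brikker (queue.getLast h)) (visited, queue.dropLast)).2)
termination_by 5 * pvF brikker visited + queue.length
decreasing_by
  have hlen : queue.dropLast.length + 1 = queue.length := by
    rw [List.length_dropLast]
    have := List.length_pos_iff.mpr h
    omega
  have hrel := pvScan_rel brikker (queue.getLast h) pvOffsets visited queue.dropLast []
  rw [List.append_nil] at hrel
  have hmeas := pvScanB_measure brikker (queue.getLast h) pvOffsets visited []
  rw [hrel]
  simp only [List.length_append, List.length_nil] at *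
  omega

def finn_naboer (brikker : List (Int × Int × Int)) (brikke : Int × Int × Int) :
    List (Int × Int × Int) :=
  pvLoopA brikker (PySem.Set.ofList [brikke]) [brikke]

-- ===== PORT B =====
mutual
-- `utforsk(celle)`: mark the new neighbours, then recurse into them in reverse;
-- the subtype carries "visited only grows", needed for termination
def pvDfs (brikker : List (Int × Int × Int)) (visited : List (Int × Int × Int))
    (celle : Int × Int × Int) : {w : List (Int × Int × Int) // visited ⊆ w} :=
  let r := pvOffsets.foldl (pvStepB brikker celle) (visited, [])
  let ⟨w, hw⟩ := pvDfsList brikker r.1 r.2.reverse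
  ⟨w, fun x hx => hw (pvScanB_subset brikker celle pvOffsets visited [] hx)⟩
termination_by 5 * pvF brikker visited + 3
decreasing_by
  have hmeas := pvScanB_measure brikker celle pvOffsets visited []
  simp only [List.length_reverse, List.length_nil] at *
  omega

-- the `for nabo in reversed(nye): utforsk(nabo)` loop
def pvDfsList (brikker : List (Int × Int × Int)) (visited : List (Int × Int × Int))
    (pending : List (Int × Int × Int)) : {w : List (Int × Int × Int) // visited ⊆ w} :=
  match pending with
  | [] => ⟨visited, fun _ h => h⟩
  | n :: rest =>
    let ⟨v2, h2⟩ := pvDfs brikker visited n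
    let ⟨w, hw⟩ := pvDfsList brikker v2 rest
    ⟨w, fun x hx => hw (h2 hx)⟩
termination_by 5 * pvF brikker visited + 2 * pending.length + 2
decreasing_by
  · simp only [List.length_cons]
    omega
  · have hF : pvF brikker v2 ≤ pvF brikker visited := by
      unfold pvF
      apply Finset.card_le_card
      apply Finset.sdiff_subset_sdiff (Finset.Subset.refl _)
      intro x hx
      simp only [List.mem_toFinset] at *
      exact h2 hx
    simp only [List.length_cons]
    omega
end

def finn_naboer_alt (brikker : List (Int × Int × Int)) (brikke : Int × Int × Int) :
    List (Int × Int × Int) :=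
  (pvDfs brikker (PySem.Set.ofList [brikke]) brikke).val

-- ===== PRECONDITION & SPEC =====
def Spec_finn_naboer (brikker : List (Int × Int × Int)) (brikke : Int × Int × Int) (out : List (Int × Int × Int)) : Prop := out = finn_naboer_alt brikker brikke
instance (brikker : List (Int × Int × Int)) (brikke : Int × Int × Int) (out : List (Int × Int × Int)) : Decidable (Spec_finn_naboer brikker brikke out) := by unfold Spec_finn_naboer; infer_instance

-- ===== CLAIM (what is proved, stated in full; the proofs are below) =====
def Claim_equal_finn_naboer : Prop := ∀ (brikker : List (Int × Int × Int)) (brikke : Int × Int × Int), Dom_finn_naboer brikker brikke → Spec_finn_naboer brikker brikke (finn_naboer brikker brikke)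

-- ===== LEMMAS AND PROOFS =====

theorem pvDfsList_nil (brikker v : List (Int × Int × Int)) :
    (pvDfsList brikker v []).val = v := by
  rw [pvDfsList]

theorem pvDfsList_cons (brikker v : List (Int × Int × Int)) (n : Int × Int × Int)
    (rest : List (Int × Int × Int)) :
    (pvDfsList brikker v (n :: rest)).val
      = (pvDfsList brikker (pvDfs brikker v n).val rest).val := by
  rw [pvDfsList]

theorem pvDfs_eq (brikker v : List (Int × Int × Int)) (c : Int × Int × Int) :
    (pvDfs brikker v c).val
      = (pvDfsList brikker ((pvOffsets.foldl (pvStepB brikker c) (v, [])).1)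
          ((pvOffsets.foldl (pvStepB brikker c) (v, [])).2).reverse).val := by
  rw [pvDfs]

theorem pvDfsList_append (brikker : List (Int × Int × Int)) :
    ∀ (p q v : List (Int × Int × Int)),
      (pvDfsList brikker v (p ++ q)).val
        = (pvDfsList brikker (pvDfsList brikker v p).val q).val := by
  intro p
  induction p with
  | nil => intro q v; rw [pvDfsList_nil]; rfl
  | cons n rest ih =>
    intro q v
    rw [List.cons_append, pvDfsList_cons, ih, pvDfsList_cons]

theorem pvLoopA_eq_dfs (brikker : List (Int × Int × Int)) :
    ∀ (visited queue : List (Int × Int × Int)),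
      pvLoopA brikker visited queue = (pvDfsList brikker visited queue.reverse).val := by
  intro visited queue
  induction visited, queue using pvLoopA.induct brikker with
  | case1 visited =>
    rw [pvLoopA, dif_pos rfl, List.reverse_nil, pvDfsList_nil]
  | case2 visited queue h ih =>
    have hq2 : queue = queue.dropLast ++ [queue.getLast h] :=
      (List.dropLast_append_getLast h).symm
    rw [pvLoopA, dif_neg h, ih]
    have hrel := pvScan_rel brikker (queue.getLast h) pvOffsets visited queue.dropLast []
    rw [List.append_nil] at hrel
    simp only [hrel, List.reverse_append]
    conv_rhs => rw [hq2]
    rw [List.reverse_append]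
    simp only [List.reverse_cons, List.reverse_nil, List.nil_append, List.cons_append]
    rw [pvDfsList_cons, pvDfs_eq, ← pvDfsList_append]
    rw [hrel]

-- ===== VERDICT (by name: the statement is the Claim_ definition above) =====
theorem finn_naboer_spec : Claim_equal_finn_naboer := by
  intro brikker brikke _
  unfold Spec_finn_naboer finn_naboer finn_naboer_alt
  rw [pvLoopA_eq_dfs]
  simp only [List.reverse_cons, List.reverse_nil, List.nil_append]
  rw [pvDfsList_cons, pvDfsList_nil]
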